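-- pv_equiv track=rewrite | github.com/sofiascalzo/CyberChallenge-programming-pretest | Cyberchallenge Pretest/2023pretest3/2023pretest3.py | find_min_workers
-- ===== SOURCE A (Python) =====
-- def is_worker_enough(tasks, T, num_workers):
--     TimeW = tasks[:num_workers]
--     i = num_workers
--
--     while i < len(tasks):
--         firstW = min(TimeW)
--         min_index = TimeW.index(firstW)
--
--         if TimeW[min_index] + tasks[i] <= T:
--             TimeW[min_index] += tasks[i]
--             i += 1
--         else:
--             return False
--
--     return True
--
-- def find_min_workers(tasks, T):
--     left, right = 1, len(tasks)
--
--     while left < right: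
--         mid = (left + right) // 2
--
--         if is_worker_enough(tasks, T, mid):
--             right = mid
--         else:
--             left = mid + 1
--
--     return left
-- ===== SOURCE B (Python) =====
-- def find_min_workers(tasks, T):
--     def step(state, t):
--         # state: ascending worker loads, or None once the schedule has failed
--         if not state:
--             return None
--         v = state[0] + t
--         if v > T:
--             return None
--         rest = state[1:]
--         i = 0
--         while i < len(rest) and rest[i] <= v:
--             i += 1
--         return rest[:i] + [v] + rest[i:]
--
--     def feasible(w):
--         state = sorted(tasks[:w])
--         for t in tasks[w:]:
--             state = step(state, t)
--         return state is not None
--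
--     lo, hi = 1, len(tasks)
--     while lo < hi:
--         mid = (lo + hi) // 2
--         if feasible(mid):
--             hi = mid
--         else:
--             lo = mid + 1
--     return lo
-- ===== Notes on version B (the rewrite author's own statement) =====
-- stated objective: faster
-- what changed: The feasibility check keeps worker loads as a sorted ascending list threaded through a fold with an Option/None failure state (head = least-loaded worker, one sorted re-insertion scan per task) instead of A's per-task full min() scan plus full .index() scan on an unsorted list, and the outer bisection runs over natural-number bounds.
import Mathlib
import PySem

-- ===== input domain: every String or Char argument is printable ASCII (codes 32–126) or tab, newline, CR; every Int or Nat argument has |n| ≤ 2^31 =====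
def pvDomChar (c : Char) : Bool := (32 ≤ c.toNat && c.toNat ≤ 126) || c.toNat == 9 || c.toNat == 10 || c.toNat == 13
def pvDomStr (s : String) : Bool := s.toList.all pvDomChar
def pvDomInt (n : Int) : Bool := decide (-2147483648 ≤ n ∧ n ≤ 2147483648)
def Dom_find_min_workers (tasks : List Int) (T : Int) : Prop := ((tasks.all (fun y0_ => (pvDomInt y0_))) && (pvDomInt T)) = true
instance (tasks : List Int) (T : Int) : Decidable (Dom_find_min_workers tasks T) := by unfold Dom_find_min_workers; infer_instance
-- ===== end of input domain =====

-- B replaces A's per-task min()+.index() scans on an unsorted load list by a sorted load list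
-- threaded through a fold with an Option (None = failed) state, and runs the bisection over
-- natural-number bounds; return values proved equal on the whole domain.

-- ===== PORT A =====
-- the while loop of is_worker_enough: i walks from num_workers up to len(tasks), so the reads
-- tasks[i] are exactly the elements of tasks[num_workers:] in order; TimeW is the loop state
def isWorkerEnoughLoop (T : Int) : List Int → List Int → Bool
  | [], _ => true
  | t :: rest, TimeW =>
    match PySem.List.min? TimeW (fun x => x) with
    | none => false      -- min([]) raises ValueError; unreachable at every call site (num_workers ≥ 1, tasks ≠ [])
    | some firstW =>
      match PySem.List.index? TimeW firstW with
      | none => false    -- unreachable: firstW ∈ TimeW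
      | some mi =>
        -- TimeW[min_index] = firstW, so 'TimeW[min_index] + tasks[i] <= T' is 'firstW + t ≤ T'
        if firstW + t ≤ T then isWorkerEnoughLoop T rest (TimeW.set mi (firstW + t))
        else false

-- num_workers is the binary-search mid, always in [1, len(tasks)] at every call site, hence Nat;
-- tasks[:num_workers] = take, tasks[num_workers:] = drop
def is_worker_enough (tasks : List Int) (T : Int) (numWorkers : Nat) : Bool :=
  isWorkerEnoughLoop T (tasks.drop numWorkers) (tasks.take numWorkers)

-- the 'while left < right' loop; 1 ≤ left ≤ mid < right ≤ len(tasks) whenever the body runs,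
-- so mid.toNat is exactly Python's mid
def fmwLoop (tasks : List Int) (T : Int) (left right : Int) : Int :=
  if h : left < right then
    let mid := PySem.Int.floordiv (left + right) 2
    if is_worker_enough tasks T mid.toNat then fmwLoop tasks T left mid
    else fmwLoop tasks T (mid + 1) right
  else left
termination_by (right - left).toNat
decreasing_by
  · have hlt : PySem.Int.floordiv (left + right) 2 < right := by
      rw [PySem.Int.floordiv_lt_iff_lt_mul (by norm_num)]; omega
    omega
  · have hb := PySem.Int.floordiv_two_mid_bounds (le_of_lt h)
    omega

def find_min_workers (tasks : List Int) (T : Int) : Int :=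
  fmwLoop tasks T 1 (tasks.length : Int)

-- ===== PORT B =====
-- step: on a live state (ascending loads), add t to the least-loaded worker (the head) and
-- re-insert its new load at its sorted position; None (= failure) is absorbing
def bInsort (v : Int) : List Int → List Int
  | [] => [v]
  | x :: xs => if x ≤ v then x :: bInsort v xs else v :: x :: xs

def bStep (T : Int) (state : Option (List Int)) (t : Int) : Option (List Int) :=
  match state with
  | none => none
  | some [] => none          -- 'if not state' also fires on an empty load list
  | some (l0 :: ls) => if l0 + t > T then none else some (bInsort (l0 + t) ls)

def bFeasible (tasks : List Int) (T : Int) (w : Nat) : Bool :=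
  ((tasks.drop w).foldl (bStep T) (some (PySem.List.sorted (tasks.take w) (fun x => x)))).isSome

-- 'while lo < hi' over Nat bounds (both start nonnegative and only grow)
def bSearch (tasks : List Int) (T : Int) (lo hi : Nat) : Nat :=
  if lo < hi then
    if bFeasible tasks T ((lo + hi) / 2) then bSearch tasks T lo ((lo + hi) / 2)
    else bSearch tasks T ((lo + hi) / 2 + 1) hi
  else lo
termination_by hi - lo
decreasing_by all_goals omega

def find_min_workers_alt (tasks : List Int) (T : Int) : Int :=
  ((bSearch tasks T 1 tasks.length : Nat) : Int)

-- ===== PRECONDITION & SPEC =====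
def Spec_find_min_workers (tasks : List Int) (T : Int) (out : Int) : Prop := out = find_min_workers_alt tasks T
instance (tasks : List Int) (T : Int) (out : Int) : Decidable (Spec_find_min_workers tasks T out) := by unfold Spec_find_min_workers; infer_instance

-- ===== CLAIM (what is proved, stated in full; the proofs are below) =====
def Claim_equal_find_min_workers : Prop := ∀ (tasks : List Int) (T : Int), Dom_find_min_workers tasks T → Spec_find_min_workers tasks T (find_min_workers tasks T)

-- ===== LEMMAS AND PROOFS =====

theorem bInsort_perm (v : Int) (l : List Int) : (bInsort v l).Perm (v :: l) := by
  induction l with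
  | nil => simp [bInsort]
  | cons x xs ih =>
    simp only [bInsort]
    split
    · exact (ih.cons x).trans (List.Perm.swap v x xs)
    · exact List.Perm.refl _

theorem bInsort_sorted (v : Int) {l : List Int} (h : List.Pairwise (· ≤ ·) l) :
    List.Pairwise (· ≤ ·) (bInsort v l) := by
  induction l with
  | nil => simp [bInsort]
  | cons x xs ih =>
    simp only [bInsort]
    rw [List.pairwise_cons] at h
    split
    · rename_i hxv
      rw [List.pairwise_cons]
      refine ⟨fun b hb => ?_, ih h.2⟩
      have hb' := (bInsort_perm v xs).mem_iff.mp hb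
      rw [List.mem_cons] at hb'
      rcases hb' with rfl | hb'
      · exact hxv
      · exact h.1 b hb'
    · rename_i hxv
      rw [List.pairwise_cons, List.pairwise_cons]
      refine ⟨fun b hb => ?_, h.1, h.2⟩
      rw [List.mem_cons] at hb
      rcases hb with rfl | hb
      · omega
      · have := h.1 b hb; omega

-- a failed schedule stays failed through the rest of the fold
theorem foldl_bStep_none (T : Int) (rest : List Int) : rest.foldl (bStep T) none = none := by
  induction rest with
  | nil => rfl
  | cons t rs ih => simpa [List.foldl, bStep] using ih

-- list update at the first index of an element, as a multiset operation
theorem set_middle (pre suf : List Int) (m v : Int) :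
    (pre ++ m :: suf).set pre.length v = pre ++ v :: suf := by
  induction pre with
  | nil => rfl
  | cons p ps ih => simp [ih]

-- core invariant: A's load list and B's load list stay permutations of each other, B's sorted;
-- each step both programs test (minimum load) + t against T and add t to one minimum-loaded worker
theorem loop_eq (T : Int) (rest : List Int) : ∀ (A B : List Int), A.Perm B → List.Pairwise (· ≤ ·) B →
    isWorkerEnoughLoop T rest A = (rest.foldl (bStep T) (some B)).isSome := by
  induction rest with
  | nil => intro A B _ _; rfl
  | cons t rs ih =>
    intro A B hp hs
    cases B with
    | nil =>
      have hA : A = [] := hp.eq_nil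
      subst hA
      simp [isWorkerEnoughLoop, PySem.List.min?, List.foldl, bStep, foldl_bStep_none]
    | cons b0 bs =>
      have hAne : A ≠ [] := by
        intro h; subst h
        exact List.cons_ne_nil b0 bs hp.symm.eq_nil
      obtain ⟨m, hmin⟩ : ∃ m, PySem.List.min? A (fun x => x) = some m := by
        cases hm : PySem.List.min? A (fun x => x) with
        | none => exact absurd ((PySem.List.min?_eq_none_iff A _).mp hm) hAne
        | some m => exact ⟨m, rfl⟩
      have hmemA : m ∈ A := PySem.List.min?_mem hmin
      have hmb : m = b0 := by
        have h1 : m ≤ b0 := PySem.List.min?_isMin hmin b0 (hp.mem_iff.mpr (by simp))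
        have hmB : m ∈ b0 :: bs := hp.mem_iff.mp hmemA
        rw [List.pairwise_cons] at hs
        rw [List.mem_cons] at hmB
        rcases hmB with rfl | hmB
        · rfl
        · have := hs.1 m hmB; omega
      obtain ⟨mi, hidx⟩ : ∃ mi, PySem.List.index? A m = some mi := by
        cases hi : PySem.List.index? A m with
        | none => exact absurd ((PySem.List.index?_eq_none_iff A m).mp hi) (by simpa using hmemA)
        | some mi => exact ⟨mi, rfl⟩
      obtain ⟨pre, suf, hAeq, hlen, -⟩ := (PySem.List.index?_eq_some_iff A m mi).mp hidx
      have hset : A.set mi (m + t) = pre ++ (m + t) :: suf := by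
        rw [hAeq, ← hlen, set_middle]
      have htail : (pre ++ suf).Perm bs := by
        have h1 : (m :: (pre ++ suf)).Perm (m :: bs) := by
          refine (List.perm_middle.symm.trans ?_)
          rw [← hAeq, hmb]; exact hp
        exact h1.cons_inv
      have hperm' : (A.set mi (m + t)).Perm (bInsort (m + t) bs) := by
        rw [hset]
        exact (List.perm_middle.trans (htail.cons (m + t))).trans (bInsort_perm (m + t) bs).symm
      have hsorted' : List.Pairwise (· ≤ ·) (bInsort (m + t) bs) := by
        rw [List.pairwise_cons] at hs
        exact bInsort_sorted _ hs.2
      simp only [isWorkerEnoughLoop, hmin, hidx, List.foldl, bStep]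
      subst hmb
      by_cases hc : m + t ≤ T
      · rw [if_pos hc, if_neg (by omega : ¬ m + t > T)]
        exact ih _ _ hperm' hsorted'
      · rw [if_neg hc, if_pos (by omega : m + t > T)]
        simp [foldl_bStep_none]

theorem feasible_eq (tasks : List Int) (T : Int) (n : Nat) :
    is_worker_enough tasks T n = bFeasible tasks T n := by
  refine loop_eq T _ _ _ (PySem.List.sorted_perm _ _ _).symm ?_
  exact PySem.List.sorted_pairwise (tasks.take n) (fun x => x)

theorem search_eq (tasks : List Int) (T : Int) (lo hi : Nat) :
    fmwLoop tasks T (lo : Int) (hi : Int) = ((bSearch tasks T lo hi : Nat) : Int) := by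
  unfold fmwLoop bSearch
  by_cases h : lo < hi
  · have hcast : ((lo : Int) + (hi : Int)) = ((lo + hi : Nat) : Int) := by push_cast; ring
    have hmid : PySem.Int.floordiv ((lo : Int) + (hi : Int)) 2 = (((lo + hi) / 2 : Nat) : Int) := by
      rw [hcast]; exact_mod_cast PySem.Int.floordiv_natCast (lo + hi) 2
    have hmidNat : (PySem.Int.floordiv ((lo : Int) + (hi : Int)) 2).toNat = (lo + hi) / 2 := by
      rw [hmid]; exact Int.toNat_natCast _
    rw [dif_pos (by exact_mod_cast h), if_pos h]
    simp only [hmid, Int.toNat_natCast, feasible_eq]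
    by_cases hf : bFeasible tasks T ((lo + hi) / 2)
    · rw [if_pos hf, if_pos hf]
      exact search_eq tasks T lo ((lo + hi) / 2)
    · rw [if_neg hf, if_neg hf]
      have hc : ((((lo + hi) / 2 : Nat) : Int) + 1) = (((lo + hi) / 2 + 1 : Nat) : Int) := by push_cast; ring
      rw [hc]
      exact search_eq tasks T ((lo + hi) / 2 + 1) hi
  · rw [dif_neg (by exact_mod_cast h), if_neg h]
termination_by hi - lo
decreasing_by all_goals omega

-- ===== VERDICT (by name: the statement is the Claim_ definition above) =====
theorem find_min_workers_spec : Claim_equal_find_min_workers := by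
  intro tasks T _
  unfold Spec_find_min_workers find_min_workers find_min_workers_alt
  exact_mod_cast search_eq tasks T 1 tasks.length
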